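-- pv_equiv track=rewrite | github.com/juyoung810/idecs-algorithm-study | jjus/2661_좋은수열.py | b_same
-- ===== SOURCE A (Python) =====
-- def b_same(str,i):
--     t_str = str[:]
--     t_str.append(i)
--     n = len(t_str)
--     for i in range(1,n//2+1):
--         if t_str[-i:] == t_str[-2*i :-i]:
--             return True
--     return False
-- ===== SOURCE B (Python) =====
-- def b_same(str, i):
--     # Z-algorithm on the reversed sequence: a repeated suffix block of size k in
--     # str+[i] is exactly a prefix-match of length >= k at offset k in the reverse.
--     r = [i] + str[::-1]
--     n = len(r)
--     z = [0] * n
--     l = rr = 0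
--     for k in range(1, n // 2 + 1):
--         m = min(rr - k, z[k - l]) if k < rr else 0
--         while k + m < n and r[m] == r[k + m]:
--             m += 1
--         z[k] = m
--         if k + m > rr:
--             l, rr = k, k + m
--         if m >= k:
--             return True
--     return False
-- ===== Notes on version B (the rewrite author's own statement) =====
-- stated objective: faster
-- what changed: Replaces the per-length slice-copy comparisons (each O(k)) with a single Z-algorithm pass over the reversed sequence, answering 'some suffix block of length k repeats' as z[k] >= k.
import Mathlib
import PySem

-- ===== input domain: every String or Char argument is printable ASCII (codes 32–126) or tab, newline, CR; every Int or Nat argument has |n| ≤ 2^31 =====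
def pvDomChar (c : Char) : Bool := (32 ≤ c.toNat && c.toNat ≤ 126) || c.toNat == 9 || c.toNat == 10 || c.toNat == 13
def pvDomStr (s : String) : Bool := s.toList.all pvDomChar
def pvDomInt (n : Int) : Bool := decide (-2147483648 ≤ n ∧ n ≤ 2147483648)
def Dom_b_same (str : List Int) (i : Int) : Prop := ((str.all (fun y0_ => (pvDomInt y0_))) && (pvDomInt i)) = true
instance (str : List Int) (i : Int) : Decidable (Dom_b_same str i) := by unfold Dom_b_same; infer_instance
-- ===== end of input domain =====

-- B replaces A's per-length O(k) slice-copy comparisons with one Z-algorithm pass over the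
-- reversed sequence (z[k] ≥ k ⟺ the last k elements repeat the preceding k), which is faster.

-- ===== PORT A =====
def b_same (str : List Int) (i : Int) : Bool :=
  -- t_str = str[:]; t_str.append(i); n = len(t_str)
  let t_str := str ++ [i]
  let n : Int := PySem.List.len t_str
  -- for i in range(1, n//2+1): if t_str[-i:] == t_str[-2*i:-i]: return True  /  return False
  (PySem.List.pyRange 1 (PySem.Int.floordiv n 2 + 1) 1).any fun j =>
    PySem.List.slice t_str (some (-j)) none == PySem.List.slice t_str (some (-(2*j))) (some (-j))

-- ===== PORT B =====
-- 'while k + m < n and r[m] == r[k + m]: m += 1' (indices are in range whenever the guard holds)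
def lcpFrom (r : List Int) (n k m : Nat) : Nat :=
  if h : k + m < n ∧ r.getD m 0 = r.getD (k + m) 0 then lcpFrom r n k (m + 1) else m
termination_by n - (k + m)
decreasing_by omega

-- the 'for k in range(1, n//2+1)' loop of Source B, carrying the z array and the [l, rr) window
def zGo (r : List Int) (n : Nat) (z : List Nat) (l rr k : Nat) : Bool :=
  if k ≤ n / 2 then
    let m0 := if k < rr then min (rr - k) (z.getD (k - l) 0) else 0
    let m := lcpFrom r n k m0
    if k ≤ m then true
    else zGo r n (z.set k m) (if rr < k + m then k else l) (if rr < k + m then k + m else rr)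
      (k + 1)
  else false
termination_by n / 2 + 1 - k
decreasing_by omega

def b_same_alt (str : List Int) (i : Int) : Bool :=
  -- r = [i] + str[::-1]; n = len(r); z = [0]*n; l = rr = 0
  let r := i :: str.reverse
  let n := r.length
  zGo r n (List.replicate n 0) 0 0 1

-- ===== PRECONDITION & SPEC =====
def Spec_b_same (str : List Int) (i : Int) (out : Bool) : Prop := out = b_same_alt str i
instance (str : List Int) (i : Int) (out : Bool) : Decidable (Spec_b_same str i out) := by unfold Spec_b_same; infer_instance

-- ===== CLAIM (what is proved, stated in full; the proofs are below) =====
def Claim_equal_b_same : Prop := ∀ (str : List Int) (i : Int), Dom_b_same str i → Spec_b_same str i (b_same str i)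

-- ===== LEMMAS AND PROOFS =====

-- length of the longest common prefix (proof-side characterisation of both programs)
def pvLcp : List Int → List Int → Nat
  | a :: as, b :: bs => if a = b then pvLcp as bs + 1 else 0
  | _, _ => 0

theorem pvLcp_le_right (A B : List Int) : pvLcp A B ≤ B.length := by
  induction A generalizing B with
  | nil => cases B <;> simp [pvLcp]
  | cons a as ih =>
    cases B with
    | nil => simp [pvLcp]
    | cons b bs =>
      simp only [pvLcp, List.length_cons]
      split_ifs
      · exact Nat.succ_le_succ (ih bs)
      · omega

theorem getElem?_eq_of_lt_pvLcp {A B : List Int} {p : Nat} (h : p < pvLcp A B) :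
    A[p]? = B[p]? := by
  induction A generalizing B p with
  | nil => simp [pvLcp] at h
  | cons a as ih =>
    cases B with
    | nil => simp [pvLcp] at h
    | cons b bs =>
      simp only [pvLcp] at h
      split_ifs at h with hab
      · cases p with
        | zero => simp [hab]
        | succ q => simpa using ih (B := bs) (p := q) (by omega)
      · omega

theorem take_eq_iff_pvLcp {A B : List Int} {j : Nat} (hA : j ≤ A.length) (hB : j ≤ B.length) :
    A.take j = B.take j ↔ j ≤ pvLcp A B := by
  induction j generalizing A B with
  | zero => simp
  | succ j ih =>
    cases A with
    | nil => simp at hA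
    | cons a as =>
      cases B with
      | nil => simp at hB
      | cons b bs =>
        simp only [List.take_succ_cons, List.cons.injEq, pvLcp]
        constructor
        · rintro ⟨rfl, htk⟩
          rw [if_pos rfl]
          have := (ih (by simpa using hA) (by simpa using hB)).1 htk
          omega
        · intro h
          split_ifs at h with hab
          · exact ⟨hab, (ih (by simpa using hA) (by simpa using hB)).2 (by omega)⟩
          · omega

theorem le_pvLcp_of {A B : List Int} {j : Nat} (hA : j ≤ A.length) (hB : j ≤ B.length)
    (h : ∀ p, p < j → A[p]? = B[p]?) : j ≤ pvLcp A B := by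
  refine (take_eq_iff_pvLcp hA hB).1 ?_
  apply List.ext_getElem?
  intro p
  by_cases hp : p < j
  · simp only [List.getElem?_take]
    rw [if_pos hp, if_pos hp, h p hp]
  · simp only [List.getElem?_take]
    rw [if_neg hp, if_neg hp]

theorem pvLcp_drop {A B : List Int} {m : Nat} (h : m ≤ pvLcp A B) :
    pvLcp A B = m + pvLcp (A.drop m) (B.drop m) := by
  induction m generalizing A B with
  | zero => simp
  | succ m ih =>
    cases A with
    | nil => simp [pvLcp] at h
    | cons a as =>
      cases B with
      | nil => simp [pvLcp] at h
      | cons b bs =>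
        simp only [pvLcp] at h ⊢
        split_ifs at h ⊢ with hab
        · have := ih (A := as) (B := bs) (by omega)
          simpa [List.drop_succ_cons] using by omega
        · omega

theorem pvLcp_nil_right (A : List Int) : pvLcp A [] = 0 := by
  cases A <;> rfl

theorem lcpFrom_eq (r : List Int) (k : Nat) (hk : 0 < k) :
    ∀ fuel m, fuel = r.length - (k + m) →
      lcpFrom r r.length k m = m + pvLcp (r.drop m) (r.drop (k + m)) := by
  intro fuel
  induction fuel with
  | zero =>
    intro m hm
    rw [lcpFrom]
    rw [dif_neg (by omega)]
    rw [show List.drop (k + m) r = [] from List.drop_eq_nil_of_le (by omega),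
      pvLcp_nil_right]
    omega
  | succ f ih =>
    intro m hm
    rw [lcpFrom]
    by_cases hg : k + m < r.length ∧ r.getD m 0 = r.getD (k + m) 0
    · rw [dif_pos hg]
      obtain ⟨hlt, heq⟩ := hg
      have hmlt : m < r.length := by omega
      rw [ih (m + 1) (by omega)]
      rw [List.drop_eq_getElem_cons hmlt, List.drop_eq_getElem_cons hlt]
      have h1 : r.getD m 0 = r[m] := List.getD_eq_getElem r 0 hmlt
      have h2 : r.getD (k + m) 0 = r[k + m] := List.getD_eq_getElem r 0 hlt
      simp only [pvLcp]
      rw [if_pos (by rw [← h1, ← h2, heq])]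
      have : k + (m + 1) = k + m + 1 := by omega
      rw [this]
      omega
    · rw [dif_neg hg]
      by_cases hlt : k + m < r.length
      · have heq : ¬ r.getD m 0 = r.getD (k + m) 0 := fun h => hg ⟨hlt, h⟩
        have hmlt : m < r.length := by omega
        rw [List.drop_eq_getElem_cons hmlt, List.drop_eq_getElem_cons hlt]
        simp only [pvLcp]
        rw [if_neg (by
          rw [← List.getD_eq_getElem r 0 hmlt, ← List.getD_eq_getElem r 0 hlt]
          exact heq)]
        omega
      · rw [show List.drop (k + m) r = [] from List.drop_eq_nil_of_le (by omega),
          pvLcp_nil_right]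
        omega

theorem zGo_step (r : List Int) (n : Nat) (z : List Nat) (l rr k : Nat) :
    zGo r n z l rr k =
      if k ≤ n / 2 then
        (if k ≤ lcpFrom r n k (if k < rr then min (rr - k) (z.getD (k - l) 0) else 0) then
          true
         else
          zGo r n
            (z.set k (lcpFrom r n k (if k < rr then min (rr - k) (z.getD (k - l) 0) else 0)))
            (if rr < k + lcpFrom r n k (if k < rr then min (rr - k) (z.getD (k - l) 0) else 0)
              then k else l)
            (if rr < k + lcpFrom r n k (if k < rr then min (rr - k) (z.getD (k - l) 0) else 0)
              then k + lcpFrom r n k (if k < rr then min (rr - k) (z.getD (k - l) 0) else 0)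
              else rr)
            (k + 1))
      else false := by
  rw [zGo]

theorem zGo_iff (r : List Int) :
    ∀ fuel z l rr k, fuel = r.length / 2 + 1 - k → 1 ≤ k → z.length = r.length →
    (∀ j, 1 ≤ j → j < k → z.getD j 0 = pvLcp r (r.drop j)) →
    ((l = 0 ∧ rr = 0) ∨
      (1 ≤ l ∧ l < k ∧ l ≤ rr ∧ rr ≤ r.length ∧ rr - l ≤ pvLcp r (r.drop l))) →
    (zGo r r.length z l rr k = true ↔
      ∃ j, k ≤ j ∧ j ≤ r.length / 2 ∧ j ≤ pvLcp r (r.drop j)) := by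
  intro fuel
  induction fuel with
  | zero =>
    intro z l rr k hf hk hzlen hz hw
    rw [zGo, if_neg (by omega)]
    simp only [Bool.false_eq_true, false_iff]
    rintro ⟨j, h1, h2, h3⟩
    omega
  | succ f ih =>
    intro z l rr k hf hk hzlen hz hw
    have hk2 : k ≤ r.length / 2 := by omega
    have hkn : k < r.length := by omega
    rw [zGo_step, if_pos hk2]
    set m0 := if k < rr then min (rr - k) (z.getD (k - l) 0) else 0 with hm0def
    -- m0 is a sound lower bound on the true match length at offset k
    have hm0 : m0 ≤ pvLcp r (r.drop k) := by
      rw [hm0def]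
      split_ifs with hkr
      · rcases hw with ⟨rfl, rfl⟩ | ⟨hl1, hlk, hlr, hrn, hwin⟩
        · omega
        · have hzv : z.getD (k - l) 0 = pvLcp r (r.drop (k - l)) :=
            hz (k - l) (by omega) (by omega)
          apply le_pvLcp_of
          · omega
          · rw [List.length_drop]; omega
          · intro p hp
            rw [hzv] at hp
            have e1 : r[p]? = r[(k - l) + p]? := by
              have := getElem?_eq_of_lt_pvLcp (A := r) (B := r.drop (k - l)) (p := p)
                (by omega)
              rwa [List.getElem?_drop] at this
            have e2 : r[(k - l) + p]? = r[k + p]? := by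
              have := getElem?_eq_of_lt_pvLcp (A := r) (B := r.drop l) (p := (k - l) + p)
                (by omega)
              rw [List.getElem?_drop] at this
              have : r[(k - l) + p]? = r[l + ((k - l) + p)]? := this
              rw [this]
              congr 1
              omega
            rw [List.getElem?_drop, e1, e2]
      · omega
    -- the computed m is exactly the true match length
    have hm : lcpFrom r r.length k m0 = pvLcp r (r.drop k) := by
      rw [lcpFrom_eq r k (by omega) (r.length - (k + m0)) m0 rfl]
      have h2 := pvLcp_drop (A := r) (B := r.drop k) (m := m0) hm0
      rw [List.drop_drop] at h2
      omega
    rw [hm]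
    set m := pvLcp r (r.drop k) with hmdef
    by_cases hkm : k ≤ m
    · rw [if_pos hkm]
      simp only [true_iff]
      refine ⟨k, le_refl k, hk2, ?_⟩
      rw [hmdef] at hkm
      exact hkm
    · rw [if_neg hkm]
      have hmn : m ≤ r.length - k := by
        have := pvLcp_le_right r (r.drop k)
        rw [List.length_drop] at this
        omega
      rw [ih (z.set k m) (if rr < k + m then k else l) (if rr < k + m then k + m else rr)
        (k + 1) (by omega) (by omega) (by rw [List.length_set]; exact hzlen) ?_ ?_]
      · constructor
        · rintro ⟨j, h1, h2, h3⟩; exact ⟨j, by omega, h2, h3⟩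
        · rintro ⟨j, h1, h2, h3⟩
          refine ⟨j, ?_, h2, h3⟩
          rcases Nat.eq_or_lt_of_le h1 with rfl | h
          · rw [← hmdef] at h3
            omega
          · omega
      · intro j hj1 hjk
        rw [List.getD_eq_getElem?_getD]
        by_cases hje : j = k
        · subst hje
          rw [List.getElem?_set_self (by omega)]
          simpa using hmdef
        · rw [List.getElem?_set_ne (by omega)]
          rw [← List.getD_eq_getElem?_getD]
          exact hz j hj1 (by omega)
      · split_ifs with hrr
        · right
          refine ⟨by omega, by omega, by omega, by omega, ?_⟩
          have hs : k + m - k = m := by omega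
          rw [hs, hmdef]
        · rcases hw with ⟨rfl, rfl⟩ | ⟨hl1, hlk, hlr, hrn, hwin⟩
          · left; exact ⟨rfl, rfl⟩
          · right; exact ⟨hl1, by omega, hlr, hrn, hwin⟩

theorem alt_iff (str : List Int) (i : Int) :
    b_same_alt str i = true ↔
      ∃ j, 1 ≤ j ∧ j ≤ (i :: str.reverse).length / 2 ∧
        j ≤ pvLcp (i :: str.reverse) ((i :: str.reverse).drop j) := by
  exact zGo_iff (i :: str.reverse) ((i :: str.reverse).length / 2)
    (List.replicate (i :: str.reverse).length 0) 0 0 1 (by omega) (by omega)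
    (by simp) (by intro j h1 h2; omega) (Or.inl ⟨rfl, rfl⟩)

-- Python slice with two negative bounds, as drop/take
theorem pvSliceNegNeg (xs : List Int) (a b : Nat) (hb : 0 < b) (hba : b ≤ a)
    (ha : a ≤ xs.length) :
    PySem.List.slice xs (some (-(a : Int))) (some (-(b : Int))) =
      (xs.drop (xs.length - a)).take (a - b) := by
  simp only [PySem.List.slice, PySem.List.clampIdx_neg_natCast _ _ hb,
    PySem.List.clampIdx_neg_natCast _ _ (by omega : 0 < a)]
  congr 1
  omega

-- 't_str[-j:] == t_str[-2j:-j]' says exactly that the reverse matches itself at offset j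
theorem slice_cond_iff (t : List Int) (j : Nat) (h1 : 1 ≤ j) (h2 : 2 * j ≤ t.length) :
    (PySem.List.slice t (some (-(j : Int))) none ==
        PySem.List.slice t (some (-((2 * j : Nat) : Int))) (some (-(j : Int)))) = true ↔
      j ≤ pvLcp t.reverse (t.reverse.drop j) := by
  rw [beq_iff_eq]
  rw [PySem.List.slice_from_neg_natCast t j h1]
  rw [pvSliceNegNeg t (2 * j) j h1 (by omega) h2]
  have hrr : t = t.reverse.reverse := by simp
  set r := t.reverse with hr
  have hrl : r.length = t.length := by simp [hr]
  rw [show t.length = r.length from hrl.symm]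
  rw [hrr]
  have e1 : r.reverse.drop (r.length - j) = (r.take j).reverse := by
    rw [List.drop_reverse]
    congr 2
    omega
  have e2 : (r.reverse.drop (r.length - 2 * j)).take (2 * j - j) =
      ((r.drop j).take j).reverse := by
    rw [List.drop_reverse]
    rw [show r.length - (r.length - 2 * j) = 2 * j from by omega]
    rw [List.take_reverse]
    rw [show (r.take (2 * j)).length - (2 * j - j) = j from by simp; omega]
    rw [List.drop_take]
    rw [show 2 * j - j = j from by omega]
  rw [e1, e2, List.reverse_inj]
  exact take_eq_iff_pvLcp (by omega) (by rw [List.length_drop]; omega)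

theorem a_iff (str : List Int) (i : Int) :
    b_same str i = true ↔
      ∃ j, 1 ≤ j ∧ j ≤ (i :: str.reverse).length / 2 ∧
        j ≤ pvLcp (i :: str.reverse) ((i :: str.reverse).drop j) := by
  have hrev : (str ++ [i]).reverse = i :: str.reverse := by simp
  have hlen : (str ++ [i]).length = (i :: str.reverse).length := by simp
  rw [show b_same str i = ((PySem.List.pyRange 1
      (PySem.Int.floordiv (PySem.List.len (str ++ [i])) 2 + 1) 1).any fun j =>
      PySem.List.slice (str ++ [i]) (some (-j)) none ==
        PySem.List.slice (str ++ [i]) (some (-(2 * j))) (some (-j))) from rfl]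
  rw [← hrev]
  simp only [List.length_reverse]
  set t := str ++ [i] with htdef
  have htl : 1 ≤ t.length := by simp [htdef]
  have hfd : PySem.Int.floordiv (PySem.List.len t) 2 = ((t.length / 2 : Nat) : Int) := by
    rw [PySem.List.len_eq]
    exact_mod_cast PySem.Int.floordiv_natCast t.length 2
  rw [hfd, List.any_eq_true]
  constructor
  · rintro ⟨x, hxmem, hxeq⟩
    rw [PySem.List.mem_pyRange_one] at hxmem
    obtain ⟨hx1, hx2⟩ := hxmem
    have hxj : x = ((x.toNat : Nat) : Int) := by omega
    have hj1 : 1 ≤ x.toNat := by omega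
    have hj2 : x.toNat ≤ t.length / 2 := by omega
    refine ⟨x.toNat, hj1, hj2, ?_⟩
    rw [← slice_cond_iff t x.toNat hj1 (by omega)]
    rw [show (-((2 * x.toNat : Nat) : Int)) = -(2 * x) from by push_cast; omega,
      show (-((x.toNat : Nat) : Int)) = -x from by omega]
    exact hxeq
  · rintro ⟨j, hj1, hj2, hcond⟩
    refine ⟨(j : Int), ?_, ?_⟩
    · rw [PySem.List.mem_pyRange_one]
      omega
    · rw [← slice_cond_iff t j hj1 (by omega)] at hcond
      rw [show (-((2 * j : Nat) : Int)) = -(2 * (j : Int)) from by push_cast; ring,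
        show (-((j : Nat) : Int)) = -(j : Int) from rfl] at hcond
      exact hcond

-- ===== VERDICT (by name: the statement is the Claim_ definition above) =====
theorem b_same_spec : Claim_equal_b_same := by
  intro str i _dom
  unfold Spec_b_same
  rw [Bool.eq_iff_iff, a_iff, alt_iff]
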